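-- pv_equiv track=rewrite | github.com/52ivepub/CodeWars | algos_56/main.py | dashatize
-- ===== SOURCE A (Python) =====
-- def dashatize(n):
--     res = ''
--     n = abs(n)
--     for i in range(len(str(n))):
--         if int(str(n)[i]) % 2 == 0:
--             res += str(n)[i]
--         else:
--             res += f'-{str(n)[i]}-'
--     return res.strip('-').replace("--", "-")
-- ===== SOURCE B (Python) =====
-- def dashatize(n):
--     s = str(abs(n))
--     res = s[0]
--     for a, b in zip(s, s[1:]):
--         if int(a) % 2 or int(b) % 2:
--             res += '-'
--         res += b
--     return res
-- ===== Notes on version B (the rewrite author's own statement) =====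
-- stated objective: simpler
-- what changed: Instead of wrapping every odd digit in dashes and then cleaning up with strip('-') and replace('--','-'), B decides each inter-digit gap directly in one pass over adjacent digit pairs (dash iff either neighbour is odd) and needs no post-processing.
import Mathlib
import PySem

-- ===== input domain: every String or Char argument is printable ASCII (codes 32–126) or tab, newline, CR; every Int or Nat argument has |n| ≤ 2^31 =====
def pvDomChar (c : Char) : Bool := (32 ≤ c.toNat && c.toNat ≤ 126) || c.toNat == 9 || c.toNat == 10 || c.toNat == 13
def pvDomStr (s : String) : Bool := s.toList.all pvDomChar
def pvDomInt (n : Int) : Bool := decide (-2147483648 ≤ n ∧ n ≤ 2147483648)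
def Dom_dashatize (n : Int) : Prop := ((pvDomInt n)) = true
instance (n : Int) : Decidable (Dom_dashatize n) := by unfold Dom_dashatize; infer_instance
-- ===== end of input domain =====

-- B replaces A's wrap-every-odd-digit-then-strip('-')/replace("--","-") cleanup by a single pass
-- over adjacent digit pairs that emits each inter-digit dash directly (objective: simpler).

-- ===== PORT A =====
def dashatize (n : Int) : String :=
  let s := PySem.Int.toChars |n|
  let res := (PySem.List.pyRange 0 (s.length : Int) 1).foldl
    (fun res i =>
      if PySem.Int.mod ((PySem.Int.ofChars? [PySem.List.pyGetD s i ' ']).getD 0) 2 = 0 then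
        res ++ [PySem.List.pyGetD s i ' ']
      else
        res ++ ['-', PySem.List.pyGetD s i ' ', '-'])
    []
  String.ofList (PySem.Chars.replace (PySem.Chars.stripChars res ['-']) ['-', '-'] ['-'])

-- ===== PORT B =====
def dashatize_alt (n : Int) : String :=
  let s := PySem.Int.toChars |n|
  let res := [PySem.List.pyGetD s 0 ' ']
  let res := (s.zip (PySem.List.slice s (some 1) none)).foldl
    (fun res ab =>
      (if ¬ PySem.Int.mod ((PySem.Int.ofChars? [ab.1]).getD 0) 2 = 0 ∨
          ¬ PySem.Int.mod ((PySem.Int.ofChars? [ab.2]).getD 0) 2 = 0 then res ++ ['-'] else res)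
      ++ [ab.2])
    res
  String.ofList res

-- ===== PRECONDITION & SPEC =====
def Spec_dashatize (n : Int) (out : String) : Prop := out = dashatize_alt n
instance (n : Int) (out : String) : Decidable (Spec_dashatize n out) := by unfold Spec_dashatize; infer_instance

-- ===== CLAIM (what is proved, stated in full; the proofs are below) =====
def Claim_equal_dashatize : Prop := ∀ (n : Int), Dom_dashatize n → Spec_dashatize n (dashatize n)

-- ===== LEMMAS AND PROOFS =====

-- the odd-digit test exactly as both ports compute it (int(c) % 2 truthy)
def pvF (c : Char) : Bool := !decide (PySem.Int.mod ((PySem.Int.ofChars? [c]).getD 0) 2 = 0)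

-- what A appends for one digit
def pvG (f : Char → Bool) (c : Char) : List Char := if f c then ['-', c, '-'] else [c]

-- the gap-separated tail B builds after the first digit
def pvM (f : Char → Bool) : Char → List Char → List Char
  | _, [] => []
  | p, c :: t => (if f p || f c then ['-'] else []) ++ c :: pvM f c t

-- A's string after strip('-'), before replace: up to two dashes per inter-digit gap
def pvR (f : Char → Bool) : Char → List Char → List Char
  | _, [] => []
  | p, c :: t => (if f p then ['-'] else []) ++ (if f c then ['-'] else []) ++ c :: pvR f c t

-- specification of replace("--","-")
def pvRep : List Char → List Char
  | [] => []
  | [c] => [c]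
  | c :: d :: t => if c = '-' ∧ d = '-' then '-' :: pvRep t else c :: pvRep (d :: t)

theorem pvRep_cons_ne {p : Char} (hp : p ≠ '-') (rest : List Char) :
    pvRep (p :: rest) = p :: pvRep rest := by
  cases rest with
  | nil => rfl
  | cons d t => simp [pvRep, hp]

theorem go_eq_pvRep : ∀ (fuel : Nat) (l acc : List Char), l.length ≤ fuel →
    PySem.Chars.replace.go ['-', '-'] ['-'] fuel l acc = acc.reverse ++ pvRep l := by
  intro fuel
  induction fuel with
  | zero =>
    intro l acc h
    have : l = [] := List.eq_nil_of_length_eq_zero (Nat.le_zero.mp h)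
    subst this
    rw [PySem.Chars.replace.go.eq_def]
    simp [pvRep]
  | succ fuel ih =>
    intro l acc h
    match l with
    | [] => rw [PySem.Chars.replace.go.eq_def]; simp [pvRep]
    | [c] =>
      rw [PySem.Chars.replace.go.eq_def]
      have hpre : (['-', '-'] : List Char).isPrefixOf [c] = false := by
        simp [List.isPrefixOf]
      simp only [hpre]
      rw [if_neg (by simp), ih [] (c :: acc) (by simp)]
      simp [pvRep]
    | c :: d :: t =>
      rw [PySem.Chars.replace.go.eq_def]
      by_cases hcd : c = '-' ∧ d = '-'
      · obtain ⟨hc, hd⟩ := hcd; subst hc; subst hd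
        have hpre : (['-', '-'] : List Char).isPrefixOf ('-' :: '-' :: t) = true := by
          simp [List.isPrefixOf]
        simp only [hpre]
        rw [if_pos (by trivial)]
        have ht : t.length ≤ fuel := by simp at h; omega
        simp only [List.length_cons, List.drop_succ_cons, List.length_nil, List.drop_zero]
        rw [ih t _ ht]
        simp [pvRep]
      · have hpre : (['-', '-'] : List Char).isPrefixOf (c :: d :: t) = false := by
          simp only [Bool.eq_false_iff, ne_eq, List.isPrefixOf_iff_prefix]
          intro hpfx
          rcases hpfx with ⟨s, hs⟩
          injection hs with h1 hs; injection hs with h2 _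
          exact hcd ⟨h1.symm, h2.symm⟩
        simp only [hpre]
        rw [if_neg (by simp)]
        rw [ih (d :: t) _ (by simp at h ⊢; omega)]
        simp [pvRep, hcd]

theorem replace_eq_pvRep (l : List Char) :
    PySem.Chars.replace l ['-', '-'] ['-'] = pvRep l := by
  simp [PySem.Chars.replace, go_eq_pvRep l.length l [] le_rfl]

theorem rstr_append (p : Char → Bool) (xs ys : List Char)
    (h : (List.dropWhile p ys.reverse).reverse ≠ []) :
    (List.dropWhile p (xs ++ ys).reverse).reverse = xs ++ (List.dropWhile p ys.reverse).reverse := by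
  rw [List.reverse_append, List.dropWhile_append]
  have : (List.dropWhile p ys.reverse).isEmpty = false := by
    simp only [List.isEmpty_eq_false_iff]
    intro hnil; exact h (by simp [hnil])
  rw [this]
  simp

theorem rstrip_flatMap (f : Char → Bool) : ∀ (t : List Char) (c : Char), c ≠ '-' → (∀ x ∈ t, x ≠ '-') →
    (List.dropWhile (fun x => [('-' : Char)].contains x)
      ((c :: ((if f c then ['-'] else []) ++ t.flatMap (pvG f))).reverse)).reverse
    = c :: pvR f c t := by
  intro t
  induction t with
  | nil =>
    intro c hc _
    by_cases hfc : f c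
    · simp [hfc, pvR, hc]
    · simp [hfc, pvR, hc]
  | cons d t ih =>
    intro c hc ht
    have hdnd : d ≠ '-' := ht d (List.mem_cons_self ..)
    have ht' : ∀ x ∈ t, x ≠ '-' := fun x hx => ht x (List.mem_cons_of_mem _ hx)
    have hd : ∀ rest : List Char,
        c :: ((if f c then ['-'] else []) ++ ((d :: t).flatMap (pvG f)))
        = (c :: (if f c then ['-'] else []) ++ (if f d then ['-'] else []))
          ++ (d :: ((if f d then ['-'] else []) ++ t.flatMap (pvG f))) := by
      intro _
      simp only [List.flatMap_cons, pvG]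
      by_cases hfd : f d <;> by_cases hfc : f c <;> simp [hfd, hfc]
    rw [hd []]
    rw [rstr_append _ _ _ (by rw [ih d hdnd ht']; simp)]
    rw [ih d hdnd ht']
    simp [pvR]

theorem strip_flatMap (f : Char → Bool) (p : Char) (t : List Char)
    (hp : p ≠ '-') (ht : ∀ c ∈ t, c ≠ '-') :
    PySem.Chars.stripChars ((p :: t).flatMap (pvG f)) ['-'] = p :: pvR f p t := by
  show (List.dropWhile (fun c => [('-' : Char)].contains c)
      (List.dropWhile (fun c => [('-' : Char)].contains c) ((p :: t).flatMap (pvG f))).reverse).reverse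
      = p :: pvR f p t
  have h1 : List.dropWhile (fun c => [('-' : Char)].contains c) ((p :: t).flatMap (pvG f))
      = p :: ((if f p then ['-'] else []) ++ t.flatMap (pvG f)) := by
    simp only [List.flatMap_cons, pvG]
    by_cases hfp : f p <;> simp [hfp, List.dropWhile, hp]
  rw [h1, rstrip_flatMap f t p hp ht]

theorem pvRep_pvR (f : Char → Bool) : ∀ (t : List Char) (p : Char), p ≠ '-' →
    (∀ c ∈ t, c ≠ '-') → pvRep (p :: pvR f p t) = p :: pvM f p t := by
  intro t
  induction t with
  | nil => intro p hp _; simp [pvR, pvM, pvRep_cons_ne hp, pvRep]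
  | cons c t ih =>
    intro p hp ht
    have hc : c ≠ '-' := ht c (List.mem_cons_self ..)
    have ht' : ∀ x ∈ t, x ≠ '-' := fun x hx => ht x (List.mem_cons_of_mem _ hx)
    have ihc := ih c hc ht'
    rw [pvRep_cons_ne hp]
    simp only [pvR, pvM]
    by_cases hfp : f p <;> by_cases hfc : f c <;>
      simp [hfp, hfc, pvRep, hc, ihc]

theorem foldzip (f : Char → Bool) : ∀ (t : List Char) (p : Char) (acc : List Char),
    ((p :: t).zip t).foldl
      (fun acc ab => (if f ab.1 || f ab.2 then acc ++ ['-'] else acc) ++ [ab.2]) acc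
    = acc ++ pvM f p t := by
  intro t
  induction t with
  | nil => intro p acc; simp [pvM]
  | cons c t ih =>
    intro p acc
    rw [List.zip_cons_cons, List.foldl_cons, ih c]
    simp only [pvM]
    by_cases h : f p || f c <;> simp [h]

theorem digitChar_ne_dash (m : Nat) : Nat.digitChar m ≠ '-' := by
  by_cases h : m < 16
  · interval_cases m <;> decide
  · have h16 : Nat.digitChar m = '*' := by
      unfold Nat.digitChar
      rw [if_neg (by omega), if_neg (by omega), if_neg (by omega), if_neg (by omega),
          if_neg (by omega), if_neg (by omega), if_neg (by omega), if_neg (by omega),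
          if_neg (by omega), if_neg (by omega), if_neg (by omega), if_neg (by omega),
          if_neg (by omega), if_neg (by omega), if_neg (by omega), if_neg (by omega)]
    rw [h16]; decide

theorem toDigitsCore_ne_dash : ∀ (fuel n : Nat) (l : List Char), (∀ c ∈ l, c ≠ '-') →
    ∀ c ∈ Nat.toDigitsCore 10 fuel n l, c ≠ '-' := by
  intro fuel
  induction fuel with
  | zero => intro n l hl; rw [Nat.toDigitsCore.eq_def]; exact hl
  | succ fuel ih =>
    intro n l hl
    rw [Nat.toDigitsCore.eq_def]
    simp only
    split
    · intro c hcm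
      rcases List.mem_cons.mp hcm with h | h
      · subst h; exact digitChar_ne_dash _
      · exact hl c h
    · exact ih _ _ (by
        intro c hcm
        rcases List.mem_cons.mp hcm with h | h
        · subst h; exact digitChar_ne_dash _
        · exact hl c h)

theorem toDigitsCore_len : ∀ (fuel n : Nat) (l : List Char),
    l.length ≤ (Nat.toDigitsCore 10 fuel n l).length := by
  intro fuel
  induction fuel with
  | zero => intro n l; rw [Nat.toDigitsCore.eq_def]
  | succ fuel ih =>
    intro n l
    rw [Nat.toDigitsCore.eq_def]
    simp only
    split
    · simp
    · exact le_trans (by simp) (ih (n / 10) (Nat.digitChar (n % 10) :: l))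

theorem toDigits_ne_nil (n : Nat) : Nat.toDigits 10 n ≠ [] := by
  unfold Nat.toDigits
  rw [Nat.toDigitsCore.eq_def]
  simp only
  split
  · simp
  · intro h
    have h2 := toDigitsCore_len n (n / 10) [Nat.digitChar (n % 10)]
    rw [h] at h2
    simp at h2

theorem pv_main (n : Int) : dashatize n = dashatize_alt n := by
  have htc : PySem.Int.toChars |n| = Nat.toDigits 10 (|n|).toNat := by
    unfold PySem.Int.toChars
    rw [if_neg (not_lt.mpr (abs_nonneg n))]
  set s := PySem.Int.toChars |n| with hs
  have hnil : s ≠ [] := by rw [htc]; exact toDigits_ne_nil _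
  obtain ⟨p, t, hpt⟩ := List.exists_cons_of_ne_nil hnil
  have hnd : ∀ c ∈ s, c ≠ '-' := by
    rw [htc]
    exact toDigitsCore_ne_dash _ _ [] (by simp)
  have hp : p ≠ '-' := hnd p (by rw [hpt]; exact List.mem_cons_self ..)
  have ht : ∀ c ∈ t, c ≠ '-' := fun c hc => hnd c (by rw [hpt]; exact List.mem_cons_of_mem _ hc)
  unfold dashatize dashatize_alt
  simp only [← hs]
  -- A side: index loop = flatMap of per-digit pieces, then strip and replace
  rw [PySem.List.foldl_pyRange_zero_pyGetD' s ' '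
    (fun res c =>
      if PySem.Int.mod ((PySem.Int.ofChars? [c]).getD 0) 2 = 0 then res ++ [c]
      else res ++ ['-', c, '-']) []]
  rw [PySem.List.foldl_congr_mem (l := s) (init := ([] : List Char))
    (f := fun res c =>
      if PySem.Int.mod ((PySem.Int.ofChars? [c]).getD 0) 2 = 0 then res ++ [c]
      else res ++ ['-', c, '-'])
    (g := fun res c => res ++ pvG pvF c)
    (by
      intro acc c _
      beta_reduce
      rcases eq_or_ne (PySem.Int.mod ((PySem.Int.ofChars? [c]).getD 0) 2) 0 with h | h
      · rw [if_pos h]; unfold pvG pvF; rw [decide_eq_true h]; simp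
      · rw [if_neg h]; unfold pvG pvF; rw [decide_eq_false h]; simp)]
  rw [PySem.List.foldl_append_eq_flatMap]
  rw [List.nil_append, hpt, strip_flatMap pvF p t hp ht, replace_eq_pvRep,
    pvRep_pvR pvF t p hp ht]
  -- B side: fold over adjacent pairs
  rw [PySem.List.slice_from (p :: t) (by omega : (0:Int) ≤ 1)]
  simp only [Int.toNat_one, List.drop_succ_cons, List.drop_zero, PySem.List.pyGetD_zero_cons]
  rw [show (fun (res : List Char) (ab : Char × Char) =>
      (if ¬ PySem.Int.mod ((PySem.Int.ofChars? [ab.1]).getD 0) 2 = 0 ∨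
          ¬ PySem.Int.mod ((PySem.Int.ofChars? [ab.2]).getD 0) 2 = 0 then res ++ ['-'] else res)
      ++ [ab.2])
      = (fun res ab => (if pvF ab.1 || pvF ab.2 then res ++ ['-'] else res) ++ [ab.2]) by
    funext res ab
    by_cases h1 : PySem.Int.mod ((PySem.Int.ofChars? [ab.1]).getD 0) 2 = 0 <;>
      by_cases h2 : PySem.Int.mod ((PySem.Int.ofChars? [ab.2]).getD 0) 2 = 0 <;>
        simp [pvF, h1, h2]]
  rw [foldzip pvF t p [p]]
  simp

-- ===== VERDICT (by name: the statement is the Claim_ definition above) =====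
theorem dashatize_spec : Claim_equal_dashatize := by
  intro n _
  unfold Spec_dashatize
  exact pv_main n
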